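-- pv_equiv track=rewrite | github.com/Illumina/Cyrius | caller/cnv_hybrid.py | transform_cnvtag
-- ===== SOURCE A (Python) =====
-- def transform_cnvtag(cnvtag):
--     """
--     Rename some cnv tags for downstream processing.
--     """
--     split_call = cnvtag.split("_")
--     # exon9hyb_star5 and dup_star13 are unlikely to occur together with yet another sv.
--     if cnvtag != "exon9hyb_star5":
--         while "exon9hyb" in split_call and "star5" in split_call:
--             split_call.remove("exon9hyb")
--             split_call.remove("star5")
--     if cnvtag != "dup_star13":
--         while "dup" in split_call and "star13" in split_call:
--             split_call.remove("dup")
--             split_call.remove("star13")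
--     if split_call.count("dup") == len(split_call):
--         return "cn" + str(len(split_call) + 2)
--     if cnvtag == "dup_dup_exon9hyb_star13intron1":
--         return "cn4"
--     return "_".join(split_call)
-- ===== SOURCE B (Python) =====
-- def _drop_first(parts, x, k):
--     # keep all elements except the first k occurrences of x
--     out = []
--     for p in parts:
--         if k > 0 and p == x:
--             k -= 1
--         else:
--             out.append(p)
--     return out
--
--
-- def transform_cnvtag(cnvtag):
--     """
--     Rename some cnv tags for downstream processing.
--     """
--     parts = cnvtag.split("_")
--     if cnvtag != "exon9hyb_star5":
--         k = min(parts.count("exon9hyb"), parts.count("star5"))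
--         parts = _drop_first(_drop_first(parts, "exon9hyb", k), "star5", k)
--     if cnvtag != "dup_star13":
--         k = min(parts.count("dup"), parts.count("star13"))
--         parts = _drop_first(_drop_first(parts, "dup", k), "star13", k)
--     if all(p == "dup" for p in parts):
--         return "cn" + str(len(parts) + 2)
--     if cnvtag == "dup_dup_exon9hyb_star13intron1":
--         return "cn4"
--     return "_".join(parts)
-- ===== Notes on version B (the rewrite author's own statement) =====
-- stated objective: simpler
-- what changed: Replaces A's repeated while-loops of membership tests plus list.remove scans with computing k = min(count(x), count(y)) once and dropping the first k occurrences of each tag in a single filtering pass.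
import Mathlib
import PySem

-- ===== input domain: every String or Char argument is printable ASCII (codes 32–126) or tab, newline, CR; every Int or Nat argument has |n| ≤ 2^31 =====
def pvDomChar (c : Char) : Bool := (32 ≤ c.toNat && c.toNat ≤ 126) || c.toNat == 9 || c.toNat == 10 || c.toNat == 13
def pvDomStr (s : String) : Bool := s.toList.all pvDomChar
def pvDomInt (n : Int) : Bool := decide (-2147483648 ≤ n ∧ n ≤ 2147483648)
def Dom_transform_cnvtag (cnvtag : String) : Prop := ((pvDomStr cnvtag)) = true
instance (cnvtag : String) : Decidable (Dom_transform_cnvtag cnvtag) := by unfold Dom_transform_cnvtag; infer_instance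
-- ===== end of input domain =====

-- B cancels each guarded tag pair by counting once and filtering in one pass, instead of A's repeated while/remove scans (simpler, same result).

-- ===== PORT A =====
-- Python list.remove is guarded by membership in A, so remove? always returns some here; getD is only a totality guard.
def pvRemoveFirst (l : List String) (v : String) : List String :=
  (PySem.List.remove? l v).getD l

theorem pvRemoveFirst_len_lt (l : List String) (v w : String) (h : v ∈ l) :
    (pvRemoveFirst (pvRemoveFirst l v) w).length < l.length := by
  unfold pvRemoveFirst
  rw [PySem.List.remove?_eq_some_erase l v h, Option.getD_some]
  have h1 := List.length_erase_of_mem h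
  have h2 : 1 ≤ l.length := List.length_pos_of_mem h
  rcases h' : PySem.List.remove? (l.erase v) w with _ | m
  · simp only [Option.getD_none]; omega
  · have hw : w ∈ l.erase v := by
      by_contra hw
      rw [(PySem.List.remove?_eq_none_iff (l.erase v) w).mpr hw] at h'
      simp at h'
    rw [PySem.List.remove?_eq_some_erase (l.erase v) w hw] at h'
    obtain rfl : (l.erase v).erase w = m := by injection h' 
    simp only [Option.getD_some]
    have h3 : ((l.erase v).erase w).length ≤ (l.erase v).length := List.length_erase_le
    omega

-- while "x" in l and "y" in l: l.remove(x); l.remove(y)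
def removeBoth (x y : String) (l : List String) : List String :=
  if h : x ∈ l ∧ y ∈ l then
    removeBoth x y (pvRemoveFirst (pvRemoveFirst l x) y)
  else l
termination_by l.length
decreasing_by exact pvRemoveFirst_len_lt l x y h.1

def transform_cnvtag (cnvtag : String) : String :=
  let s0 := (PySem.Str.split? cnvtag "_").getD []   -- sep "_" ≠ "": split? is always some
  let s1 := if cnvtag ≠ "exon9hyb_star5" then removeBoth "exon9hyb" "star5" s0 else s0
  let s2 := if cnvtag ≠ "dup_star13" then removeBoth "dup" "star13" s1 else s1
  if PySem.List.count s2 "dup" = s2.length then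
    "cn" ++ PySem.Int.toStr ((s2.length : Int) + 2)
  else if cnvtag = "dup_dup_exon9hyb_star13intron1" then "cn4"
  else PySem.Str.join "_" s2

-- ===== PORT B =====
-- _drop_first(parts, x, k): keep all but the first k occurrences of x
def dropFirst (parts : List String) (x : String) (k : Nat) : List String :=
  match parts with
  | [] => []
  | p :: rest => if k ≠ 0 ∧ p = x then dropFirst rest x (k - 1) else p :: dropFirst rest x k

def transform_cnvtag_alt (cnvtag : String) : String :=
  let p0 := (PySem.Str.split? cnvtag "_").getD []   -- sep "_" ≠ "": split? is always some
  let p1 := if cnvtag ≠ "exon9hyb_star5" then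
      let k := min (PySem.List.count p0 "exon9hyb") (PySem.List.count p0 "star5")
      dropFirst (dropFirst p0 "exon9hyb" k) "star5" k
    else p0
  let p2 := if cnvtag ≠ "dup_star13" then
      let k := min (PySem.List.count p1 "dup") (PySem.List.count p1 "star13")
      dropFirst (dropFirst p1 "dup" k) "star13" k
    else p1
  if p2.all (fun p => p == "dup") then
    "cn" ++ PySem.Int.toStr ((p2.length : Int) + 2)
  else if cnvtag = "dup_dup_exon9hyb_star13intron1" then "cn4"
  else PySem.Str.join "_" p2

-- ===== PRECONDITION & SPEC =====
def Spec_transform_cnvtag (cnvtag : String) (out : String) : Prop := out = transform_cnvtag_alt cnvtag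
instance (cnvtag : String) (out : String) : Decidable (Spec_transform_cnvtag cnvtag out) := by unfold Spec_transform_cnvtag; infer_instance

-- ===== CLAIM (what is proved, stated in full; the proofs are below) =====
def Claim_equal_transform_cnvtag : Prop := ∀ (cnvtag : String), Dom_transform_cnvtag cnvtag → Spec_transform_cnvtag cnvtag (transform_cnvtag cnvtag)

-- ===== LEMMAS AND PROOFS =====

theorem dropFirst_zero (l : List String) (x : String) : dropFirst l x 0 = l := by
  induction l with
  | nil => rfl
  | cons p rest ih => simp [dropFirst, ih]

theorem dropFirst_succ (l : List String) (x : String) (k : Nat) (h : x ∈ l) :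
    dropFirst l x (k + 1) = dropFirst (l.erase x) x k := by
  induction l with
  | nil => cases h
  | cons p rest ih =>
    by_cases hp : p = x
    · subst hp
      simp [dropFirst, List.erase_cons_head]
    · have hx : x ∈ rest := by
        rcases List.mem_cons.mp h with h1 | h1
        · exact absurd h1.symm hp
        · exact h1
      simp [dropFirst, hp, List.erase_cons_tail, ih hx]

theorem dropFirst_erase_comm (l : List String) (x y : String) (k : Nat) (hxy : x ≠ y) :
    dropFirst (l.erase y) x k = (dropFirst l x k).erase y := by
  induction l generalizing k with
  | nil => rfl
  | cons p rest ih =>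
    by_cases hp : p = y
    · subst hp
      simp [dropFirst, List.erase_cons_head, Ne.symm hxy, List.erase_cons_head]
    · rw [List.erase_cons_tail (by simpa using hp)]
      by_cases hk : k ≠ 0 ∧ p = x
      · simp [dropFirst, hk, ih]
      · simp only [dropFirst, if_neg hk]
        rw [List.erase_cons_tail (by simpa using hp), ih]

theorem count_dropFirst (l : List String) (x y : String) (k : Nat) (hxy : y ≠ x) :
    (dropFirst l x k).count y = l.count y := by
  induction l generalizing k with
  | nil => rfl
  | cons p rest ih =>
    by_cases hk : k ≠ 0 ∧ p = x
    · rw [dropFirst, if_pos hk, ih, List.count_cons]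
      simp [hk.2, Ne.symm hxy]
    · rw [dropFirst, if_neg hk, List.count_cons, List.count_cons, ih]

theorem removeBoth_eq_dropFirst (x y : String) (hxy : x ≠ y) (l : List String) :
    removeBoth x y l =
      dropFirst (dropFirst l x (min (l.count x) (l.count y))) y (min (l.count x) (l.count y)) := by
  induction hn : l.length using Nat.strong_induction_on generalizing l with
  | _ n ih =>
  subst hn
  rw [removeBoth]
  by_cases h : x ∈ l ∧ y ∈ l
  · rw [dif_pos h]
    obtain ⟨hx, hy⟩ := h
    have hyx : y ≠ x := Ne.symm hxy
    have hy' : y ∈ l.erase x := (List.mem_erase_of_ne hyx).mpr hy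
    have e1 : pvRemoveFirst l x = l.erase x := by
      unfold pvRemoveFirst; rw [PySem.List.remove?_eq_some_erase l x hx, Option.getD_some]
    have e2 : pvRemoveFirst (l.erase x) y = (l.erase x).erase y := by
      unfold pvRemoveFirst; rw [PySem.List.remove?_eq_some_erase (l.erase x) y hy', Option.getD_some]
    set l' := (l.erase x).erase y with hl'
    have hlen : l'.length < l.length := by
      have h1 := List.length_erase_of_mem hx
      have h2 : 1 ≤ l.length := List.length_pos_of_mem hx
      have h3 : l'.length ≤ (l.erase x).length := List.length_erase_le
      omega
    have cx' : l'.count x = l.count x - 1 := by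
      rw [hl', List.count_erase_of_ne hxy, List.count_erase_self]
    have cy' : l'.count y = l.count y - 1 := by
      rw [hl', List.count_erase_self, List.count_erase_of_ne hyx]
    have hcx : 1 ≤ l.count x := List.one_le_count_iff.mpr hx
    have hcy : 1 ≤ l.count y := List.one_le_count_iff.mpr hy
    have hk : min (l.count x) (l.count y) = min (l'.count x) (l'.count y) + 1 := by
      rw [cx', cy']; omega
    rw [e1, e2, ih l'.length hlen l' rfl]
    set k' := min (l'.count x) (l'.count y) with hk'
    have step1 : dropFirst l' x k' = (dropFirst l x (k' + 1)).erase y := by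
      rw [hl', dropFirst_erase_comm _ _ _ _ hxy, dropFirst_succ _ _ _ hx]
    have hymem : y ∈ dropFirst l x (k' + 1) := by
      have : (dropFirst l x (k' + 1)).count y = l.count y := count_dropFirst _ _ _ _ hyx
      exact List.one_le_count_iff.mp (by omega)
    rw [step1, ← dropFirst_succ _ _ _ hymem, hk]
  · rw [dif_neg h]
    have hk0 : min (l.count x) (l.count y) = 0 := by
      rcases not_and_or.mp h with h' | h'
      · simp [List.count_eq_zero_of_not_mem h']
      · simp [List.count_eq_zero_of_not_mem h']
    rw [hk0, dropFirst_zero, dropFirst_zero]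

theorem count_eq_length_iff_all (l : List String) (x : String) :
    (List.count x l = l.length) ↔ (l.all (fun p => p == x) = true) := by
  constructor
  · intro h
    rw [List.all_eq_true]
    intro p hp
    have hxp : x = p := List.count_eq_length.mp h p hp
    simp [hxp]
  · intro h
    apply List.count_eq_length.mpr
    intro b hb
    have hb' : (b == x) = true := by simpa using List.all_eq_true.mp h b hb
    exact (beq_iff_eq.mp hb').symm

-- ===== VERDICT (by name: the statement is the Claim_ definition above) =====
theorem transform_cnvtag_spec : Claim_equal_transform_cnvtag := by
  intro cnvtag _
  unfold Spec_transform_cnvtag transform_cnvtag transform_cnvtag_alt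
  have h1 := removeBoth_eq_dropFirst "exon9hyb" "star5" (by decide)
  have h2 := removeBoth_eq_dropFirst "dup" "star13" (by decide)
  simp only [PySem.List.count_eq] at *
  simp only [h1, h2]
  set p2 := (if cnvtag ≠ "dup_star13" then _ else _) with hp2
  by_cases hc : List.count "dup" p2 = p2.length
  · rw [if_pos hc, if_pos ((count_eq_length_iff_all p2 "dup").mp hc)]
  · rw [if_neg hc, if_neg (fun hall => hc ((count_eq_length_iff_all p2 "dup").mpr hall))]
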